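-- pv_equiv track=rewrite | github.com/sopify-ai/sopify | installer/validate.py | _extract_last_xtrace_subcommand
-- ===== SOURCE A (Python) =====
-- def _extract_last_xtrace_subcommand(stderr: str) -> str | None:
--     for line in reversed(stderr.splitlines()):
--         stripped = line.strip()
--         if not stripped.startswith("+"):
--             continue
--         normalized = stripped.lstrip("+").strip()
--         if normalized:
--             return normalized
--     return None
-- ===== SOURCE B (Python) =====
-- def _extract_last_xtrace_subcommand(stderr: str) -> str | None:
--     result = None
--     for line in stderr.splitlines():
--         stripped = line.strip()
--         if not stripped.startswith("+"):
--             continue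
--         normalized = stripped.lstrip("+").strip()
--         if normalized:
--             result = normalized
--     return result
-- ===== Notes on version B (the rewrite author's own statement) =====
-- stated objective: alternative
-- what changed: Replaces A's reverse-scan with early return by a forward full pass over the lines that overwrites an accumulator on every match, returning the accumulator at the end.
import Mathlib
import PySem

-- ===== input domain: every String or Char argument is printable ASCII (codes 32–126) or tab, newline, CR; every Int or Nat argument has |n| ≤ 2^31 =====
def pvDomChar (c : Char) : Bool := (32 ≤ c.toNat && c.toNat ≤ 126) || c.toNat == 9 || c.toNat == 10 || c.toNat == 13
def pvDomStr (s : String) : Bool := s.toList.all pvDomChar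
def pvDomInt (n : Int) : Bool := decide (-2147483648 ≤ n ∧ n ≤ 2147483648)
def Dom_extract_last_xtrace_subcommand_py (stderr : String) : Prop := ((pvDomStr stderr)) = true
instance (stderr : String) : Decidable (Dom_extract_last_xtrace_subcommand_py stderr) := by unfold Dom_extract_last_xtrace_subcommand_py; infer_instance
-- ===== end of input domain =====

-- B replaces A's reverse scan with early return by one forward pass that overwrites an
-- accumulator on every matching line (objective: alternative decomposition, same cost).

-- ===== PORT A =====
-- the for-loop over reversed(splitlines) with early return
def pvA_loop : List String → Option String
  | [] => none
  | line :: rest =>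
    let stripped := PySem.Str.strip line
    if PySem.Str.startswith stripped "+" = false then pvA_loop rest
    else
      -- lstrip("+") ported by hand: drop leading '+' characters (exact, chars = {'+'})
      let normalized := PySem.Str.strip (String.ofList (stripped.toList.dropWhile (fun c => c == '+')))
      if normalized ≠ "" then some normalized else pvA_loop rest

def extract_last_xtrace_subcommand_py (stderr : String) : Option String :=
  pvA_loop (PySem.Str.splitlines stderr).reverse

-- ===== PORT B =====
def extract_last_xtrace_subcommand_py_alt (stderr : String) : Option String :=
  (PySem.Str.splitlines stderr).foldl
    (fun result line =>
      let stripped := PySem.Str.strip line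
      if PySem.Str.startswith stripped "+" = false then result
      else
        -- lstrip("+") ported by hand: drop leading '+' characters (exact, chars = {'+'})
        let normalized := PySem.Str.strip (String.ofList (stripped.toList.dropWhile (fun c => c == '+')))
        if normalized ≠ "" then some normalized else result)
    none

-- ===== PRECONDITION & SPEC =====
def Spec_extract_last_xtrace_subcommand_py (stderr : String) (out : Option String) : Prop := out = extract_last_xtrace_subcommand_py_alt stderr
instance (stderr : String) (out : Option String) : Decidable (Spec_extract_last_xtrace_subcommand_py stderr out) := by unfold Spec_extract_last_xtrace_subcommand_py; infer_instance

-- ===== CLAIM (what is proved, stated in full; the proofs are below) =====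
def Claim_equal_extract_last_xtrace_subcommand_py : Prop := ∀ (stderr : String), Dom_extract_last_xtrace_subcommand_py stderr → Spec_extract_last_xtrace_subcommand_py stderr (extract_last_xtrace_subcommand_py stderr)

-- ===== LEMMAS AND PROOFS =====

-- A's scan distributes over append: the front of the list wins.
theorem pvA_loop_append (u v : List String) :
    pvA_loop (u ++ v) = (pvA_loop u).or (pvA_loop v) := by
  induction u with
  | nil => simp [pvA_loop]
  | cons x t ih =>
    simp only [List.cons_append, pvA_loop]
    split_ifs <;> simp [ih]

-- B's fold equals A's scan of the reversed list, with the accumulator as fallback.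
theorem pvB_foldl_eq (ls : List String) (acc : Option String) :
    ls.foldl
      (fun result line =>
        let stripped := PySem.Str.strip line
        if PySem.Str.startswith stripped "+" = false then result
        else
          let normalized := PySem.Str.strip (String.ofList (stripped.toList.dropWhile (fun c => c == '+')))
          if normalized ≠ "" then some normalized else result)
      acc = (pvA_loop ls.reverse).or acc := by
  induction ls generalizing acc with
  | nil => simp [pvA_loop]
  | cons x t ih =>
    simp only [List.foldl_cons, List.reverse_cons, pvA_loop_append, Option.or_assoc, ih]
    congr 1
    simp only [pvA_loop]
    split_ifs <;> simp

-- ===== VERDICT (by name: the statement is the Claim_ definition above) =====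
theorem extract_last_xtrace_subcommand_py_spec : Claim_equal_extract_last_xtrace_subcommand_py := by
  intro stderr _
  unfold Spec_extract_last_xtrace_subcommand_py extract_last_xtrace_subcommand_py extract_last_xtrace_subcommand_py_alt
  rw [pvB_foldl_eq]
  simp
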